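-- pv_equiv track=rewrite | github.com/johnsm21/SDD-Dataset | utility.py | expandCategory
-- ===== SOURCE A (Python) =====
-- def expandCategory(s):
--     cat = s.strip();
--
--     # Start the exapnding
--     expandableChars = ['/', '<', '>']; # might need to add '-', maybe we do a glove check?
--     for exp in expandableChars:
--         if exp in cat:
--             fatCat = '';
--             isFirst = True;
--             for catPart in cat.split(exp):
--                 if isFirst:
--                     fatCat = catPart;
--                     isFirst = False;
--
--                 else:
--                     fatCat = fatCat + ' ' + exp + ' ' + catPart;
--
--             cat = fatCat.strip();
--     return cat;
-- ===== SOURCE B (Python) =====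
-- def expandCategory(s):
--     out = []
--     for c in s.strip():
--         if c in '/<>':
--             out.append(' ' + c + ' ')
--         else:
--             out.append(c)
--     return ''.join(out).strip()
-- ===== Notes on version B (the rewrite author's own statement) =====
-- stated objective: simpler
-- what changed: B replaces A's three separate split/rejoin passes (one per special character, each with its own re-strip) by a single left-to-right pass over the stripped string that pads each special character with spaces, followed by one final strip.
import Mathlib
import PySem

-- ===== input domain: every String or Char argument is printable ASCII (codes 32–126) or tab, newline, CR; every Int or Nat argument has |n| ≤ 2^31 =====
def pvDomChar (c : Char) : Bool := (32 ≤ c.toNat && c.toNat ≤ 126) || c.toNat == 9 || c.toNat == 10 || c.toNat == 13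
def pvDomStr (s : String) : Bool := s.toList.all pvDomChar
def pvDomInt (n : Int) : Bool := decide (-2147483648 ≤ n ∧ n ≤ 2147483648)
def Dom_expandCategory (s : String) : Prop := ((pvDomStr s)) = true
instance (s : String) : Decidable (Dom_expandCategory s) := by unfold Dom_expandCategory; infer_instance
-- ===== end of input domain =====

-- B replaces A's three split/rejoin passes by one character scan with a single final strip (objective: simpler).

-- ===== PORT A =====
def expandCategoryCoreA (cs : List Char) : List Char :=
  (['/', '<', '>']).foldl
    (fun cat exp =>
      if PySem.Chars.isIn [exp] cat then
        PySem.Chars.strip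
          (((PySem.Chars.splitOn cat [exp]).foldl
              (fun st catPart =>
                if st.2 then (catPart, false)
                else (st.1 ++ ' ' :: exp :: ' ' :: catPart, false))
              (([] : List Char), true)).1)
      else cat)
    (PySem.Chars.strip cs)

def expandCategory (s : String) : String := String.ofList (expandCategoryCoreA s.toList)

-- ===== PORT B =====
def expandCategoryCoreB (cs : List Char) : List Char :=
  PySem.Chars.strip
    ((PySem.Chars.strip cs).foldl
      (fun out c =>
        if PySem.Chars.isIn [c] ['/', '<', '>'] then out ++ [' ', c, ' ']
        else out ++ [c])
      ([] : List Char))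

def expandCategory_alt (s : String) : String := String.ofList (expandCategoryCoreB s.toList)

-- ===== PRECONDITION & SPEC =====
def Spec_expandCategory (s : String) (out : String) : Prop := out = expandCategory_alt s
instance (s : String) (out : String) : Decidable (Spec_expandCategory s out) := by unfold Spec_expandCategory; infer_instance

-- ===== CLAIM (what is proved, stated in full; the proofs are below) =====
def Claim_equal_expandCategory : Prop := ∀ (s : String), Dom_expandCategory s → Spec_expandCategory s (expandCategory s)

-- ===== LEMMAS AND PROOFS =====

-- proof-side helpers: per-character expansion of one special char (pvF) and of all three (pvG),
-- and a simple structural recursion pvSp mirroring what splitOn computes on a one-char separator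
def pvF (e c : Char) : List Char := if c = e then [' ', e, ' '] else [c]

def pvG (c : Char) : List Char := if c ∈ ['/', '<', '>'] then [' ', c, ' '] else [c]

def pvSp (e : Char) : List Char → List Char × List (List Char)
  | [] => ([], [])
  | c :: rest =>
      let pr := pvSp e rest
      if c = e then ([], pr.1 :: pr.2) else (c :: pr.1, pr.2)

lemma pvSingletonInfix (c : Char) (l : List Char) : [c] <:+: l ↔ c ∈ l := by
  constructor
  · intro h; exact h.mem (by simp)
  · intro h
    obtain ⟨a, b, rfl⟩ := List.mem_iff_append.mp h
    exact ⟨a, b, by simp⟩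

lemma pvIsIn_iff (c : Char) (l : List Char) : PySem.Chars.isIn [c] l = true ↔ c ∈ l := by
  rw [PySem.Chars.isIn_iff_infix]; exact pvSingletonInfix c l

lemma pvGoEq (e : Char) (fuel : Nat) : ∀ (l cur acc : _), l.length < fuel →
    PySem.Chars.splitOn.go [e] fuel l cur acc
      = acc.reverse ++ (cur.reverse ++ (pvSp e l).1) :: (pvSp e l).2 := by
  induction fuel with
  | zero => intro l cur acc h; omega
  | succ fuel ih =>
    intro l cur acc h
    cases l with
    | nil => simp [PySem.Chars.splitOn.go, pvSp]
    | cons c rest =>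
      by_cases hce : e = c
      · subst hce
        simp only [PySem.Chars.splitOn.go]
        rw [if_pos (by simp [List.isPrefixOf])]
        have hlen : (List.drop [e].length (e :: rest)).length < fuel := by
          simp at h ⊢; omega
        rw [ih _ _ _ hlen]
        simp [pvSp, List.append_assoc]
      · have hc : ¬ c = e := fun hh => hce hh.symm
        simp only [PySem.Chars.splitOn.go]
        rw [if_neg (by simp [List.isPrefixOf]; intro hh; exact absurd hh hce)]
        have hlen : rest.length < fuel := by simp at h; omega
        rw [ih _ _ _ hlen]
        simp [pvSp, hc, List.append_assoc]

lemma pvSplitOnEq (e : Char) (l : List Char) :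
    PySem.Chars.splitOn l [e] = (pvSp e l).1 :: (pvSp e l).2 := by
  unfold PySem.Chars.splitOn
  rw [pvGoEq e (l.length + 1) l [] [] (by omega)]
  simp

lemma pvJoinAux (e : Char) (ps : List (List Char)) : ∀ (acc : List Char),
    (ps.foldl
        (fun st catPart =>
          if st.2 then (catPart, false)
          else (st.1 ++ ' ' :: e :: ' ' :: catPart, false))
        (acc, false)).1
      = acc ++ ps.flatMap (fun q => ' ' :: e :: ' ' :: q) := by
  induction ps with
  | nil => intro acc; simp
  | cons q qs ih =>
    intro acc
    simp only [List.foldl_cons, List.flatMap_cons]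
    rw [show (if (false : Bool) then (q, false)
          else (acc ++ ' ' :: e :: ' ' :: q, false)) = (acc ++ ' ' :: e :: ' ' :: q, false) from rfl]
    rw [ih]
    simp [List.append_assoc]

lemma pvJoinEq (e : Char) (p : List Char) (ps : List (List Char)) :
    ((p :: ps).foldl
        (fun st catPart =>
          if st.2 then (catPart, false)
          else (st.1 ++ ' ' :: e :: ' ' :: catPart, false))
        (([] : List Char), true)).1
      = p ++ ps.flatMap (fun q => ' ' :: e :: ' ' :: q) := by
  simp only [List.foldl_cons]
  rw [if_pos trivial]
  exact pvJoinAux e ps p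

lemma pvSpFlat (e : Char) (l : List Char) :
    (pvSp e l).1 ++ (pvSp e l).2.flatMap (fun q => ' ' :: e :: ' ' :: q) = l.flatMap (pvF e) := by
  induction l with
  | nil => simp [pvSp]
  | cons c rest ih =>
    by_cases hc : c = e
    · subst hc
      simp only [pvSp, List.flatMap_cons]
      simp [pvF, ← ih]
    · simp only [pvSp, if_neg hc, List.flatMap_cons]
      simp [pvF, hc, ← ih]

lemma pvFlatId (e : Char) (l : List Char) (h : e ∉ l) : l.flatMap (pvF e) = l := by
  induction l with
  | nil => simp
  | cons c rest ih =>
    simp only [List.flatMap_cons]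
    have hc : ¬ c = e := fun hh => h (hh ▸ List.mem_cons_self)
    rw [pvF, if_neg hc, ih (fun hm => h (List.mem_cons_of_mem _ hm))]
    simp

lemma pvDropWhileAllNil {p : Char → Bool} {a : List Char} (h : ∀ c ∈ a, p c = true) :
    List.dropWhile p a = [] := by
  induction a with
  | nil => simp
  | cons c rest ih =>
    rw [List.dropWhile_cons, if_pos (h c List.mem_cons_self)]
    exact ih (fun x hx => h x (List.mem_cons_of_mem _ hx))

lemma pvStripAppendLeft (a y : List Char) (h : ∀ c ∈ a, PySem.Chars.isspace c = true) :
    PySem.Chars.strip (a ++ y) = PySem.Chars.strip y := by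
  simp [PySem.Chars.strip, PySem.Chars.lstrip, List.dropWhile_append, pvDropWhileAllNil h]

lemma pvRstripAppend (y b : List Char) (h : ∀ c ∈ b, PySem.Chars.isspace c = true) :
    PySem.Chars.rstrip (y ++ b) = PySem.Chars.rstrip y := by
  have hb : ∀ c ∈ b.reverse, PySem.Chars.isspace c = true := by
    intro c hc; exact h c (List.mem_reverse.mp hc)
  simp [PySem.Chars.rstrip, List.dropWhile_append, pvDropWhileAllNil hb]

lemma pvStripAppendRight (y b : List Char) (h : ∀ c ∈ b, PySem.Chars.isspace c = true) :
    PySem.Chars.strip (y ++ b) = PySem.Chars.strip y := by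
  by_cases hy : List.dropWhile PySem.Chars.isspace y = []
  · have hsub : ∀ c ∈ List.dropWhile PySem.Chars.isspace b, PySem.Chars.isspace c = true := by
      intro c hc; exact h c (List.dropWhile_sublist _ |>.mem hc)
    have h2 : ∀ x : List Char, (∀ c ∈ x, PySem.Chars.isspace c = true) →
        PySem.Chars.rstrip x = [] := by
      intro x hx
      unfold PySem.Chars.rstrip
      rw [pvDropWhileAllNil (fun c hc => hx c (List.mem_reverse.mp hc))]
      rfl
    simp [PySem.Chars.strip, PySem.Chars.lstrip, List.dropWhile_append, hy]
    rw [h2 _ hsub, h2 [] (by simp)]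
  · simp [PySem.Chars.strip, PySem.Chars.lstrip, List.dropWhile_append, hy]
    exact pvRstripAppend _ _ h

lemma pvStripDecomp (l : List Char) : ∃ a b : List Char,
    l = a ++ PySem.Chars.strip l ++ b
      ∧ (∀ c ∈ a, PySem.Chars.isspace c = true) ∧ (∀ c ∈ b, PySem.Chars.isspace c = true) := by
  set p := PySem.Chars.isspace with hp
  refine ⟨List.takeWhile p l, (List.takeWhile p (List.dropWhile p l).reverse).reverse, ?_, ?_, ?_⟩
  · have h1 : l = List.takeWhile p l ++ List.dropWhile p l := (List.takeWhile_append_dropWhile).symm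
    have h2 : List.dropWhile p l
        = PySem.Chars.strip l ++ (List.takeWhile p (List.dropWhile p l).reverse).reverse := by
      set r := List.dropWhile p l with hr
      have : r.reverse = List.takeWhile p r.reverse ++ List.dropWhile p r.reverse :=
        (List.takeWhile_append_dropWhile).symm
      have h3 : r = (List.dropWhile p r.reverse).reverse ++ (List.takeWhile p r.reverse).reverse := by
        calc r = r.reverse.reverse := by simp
        _ = (List.takeWhile p r.reverse ++ List.dropWhile p r.reverse).reverse := by rw [← this]
        _ = (List.dropWhile p r.reverse).reverse ++ (List.takeWhile p r.reverse).reverse := by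
              rw [List.reverse_append]
      simpa [PySem.Chars.strip, PySem.Chars.lstrip, PySem.Chars.rstrip, ← hr, ← hp] using h3
    calc l = List.takeWhile p l ++ List.dropWhile p l := h1
    _ = List.takeWhile p l ++ (PySem.Chars.strip l ++ (List.takeWhile p (List.dropWhile p l).reverse).reverse) := by rw [← h2]
    _ = _ := by rw [List.append_assoc]
  · intro c hc; exact List.mem_takeWhile_imp hc
  · intro c hc; exact List.mem_takeWhile_imp (List.mem_reverse.mp hc)

lemma pvStripIdem (l : List Char) :
    PySem.Chars.strip (PySem.Chars.strip l) = PySem.Chars.strip l := by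
  obtain ⟨a, b, hl, ha, hb⟩ := pvStripDecomp l
  conv_rhs => rw [hl]
  rw [List.append_assoc, pvStripAppendLeft _ _ ha, pvStripAppendRight _ _ hb]

lemma pvStripFlatStrip (e : Char) (he : PySem.Chars.isspace e = false) (m : List Char) :
    PySem.Chars.strip ((PySem.Chars.strip m).flatMap (pvF e))
      = PySem.Chars.strip (m.flatMap (pvF e)) := by
  obtain ⟨a, b, hm, ha, hb⟩ := pvStripDecomp m
  have hea : e ∉ a := fun hc => by rw [ha e hc] at he; cases he
  have heb : e ∉ b := fun hc => by rw [hb e hc] at he; cases he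
  conv_rhs => rw [hm]
  rw [List.append_assoc, List.flatMap_append, List.flatMap_append]
  rw [pvFlatId e a hea, pvFlatId e b heb]
  rw [pvStripAppendLeft _ _ ha, pvStripAppendRight _ _ hb]

lemma pvPassEq (e : Char) (l : List Char) (hl : PySem.Chars.strip l = l) :
    (if PySem.Chars.isIn [e] l then
        PySem.Chars.strip
          (((PySem.Chars.splitOn l [e]).foldl
              (fun st catPart =>
                if st.2 then (catPart, false)
                else (st.1 ++ ' ' :: e :: ' ' :: catPart, false))
              (([] : List Char), true)).1)
      else l)
      = PySem.Chars.strip (l.flatMap (pvF e)) := by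
  by_cases hIn : PySem.Chars.isIn [e] l = true
  · rw [if_pos hIn, pvSplitOnEq, pvJoinEq, pvSpFlat]
  · rw [if_neg hIn]
    have hne : e ∉ l := fun hm => hIn ((pvIsIn_iff e l).mpr hm)
    rw [pvFlatId e l hne, hl]

lemma pvComp (c : Char) :
    (pvF '/' c).flatMap (fun x => (pvF '<' x).flatMap (pvF '>')) = pvG c := by
  by_cases h1 : c = '/'
  · subst h1; decide
  by_cases h2 : c = '<'
  · subst h2; decide
  by_cases h3 : c = '>'
  · subst h3; decide
  simp [pvF, pvG, h1, h2, h3]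

lemma pvFoldB (l : List Char) : ∀ acc : List Char,
    l.foldl
        (fun out c =>
          if PySem.Chars.isIn [c] ['/', '<', '>'] then out ++ [' ', c, ' ']
          else out ++ [c])
        acc
      = acc ++ l.flatMap pvG := by
  induction l with
  | nil => intro acc; simp
  | cons c rest ih =>
    intro acc
    simp only [List.foldl_cons, List.flatMap_cons]
    by_cases hc : c ∈ ['/', '<', '>']
    · rw [if_pos ((pvIsIn_iff c _).mpr hc), ih, pvG, if_pos hc]
      simp [List.append_assoc]
    · rw [if_neg (fun hh => hc ((pvIsIn_iff c _).mp hh)), ih, pvG, if_neg hc]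
      simp [List.append_assoc]

lemma pvCoreEq (cs : List Char) : expandCategoryCoreA cs = expandCategoryCoreB cs := by
  simp only [expandCategoryCoreA, List.foldl_cons, List.foldl_nil]
  rw [pvPassEq '/' _ (pvStripIdem cs)]
  rw [pvPassEq '<' _ (pvStripIdem _), pvStripFlatStrip '<' (by decide)]
  rw [pvPassEq '>' _ (pvStripIdem _), pvStripFlatStrip '>' (by decide)]
  rw [List.flatMap_assoc, List.flatMap_assoc]
  have hg : (fun c => (pvF '/' c).flatMap (fun x => (pvF '<' x).flatMap (pvF '>'))) = pvG :=
    funext pvComp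
  rw [hg]
  rw [expandCategoryCoreB, pvFoldB]
  simp

-- ===== VERDICT (by name: the statement is the Claim_ definition above) =====
theorem expandCategory_spec : Claim_equal_expandCategory := by
  intro s _
  unfold Spec_expandCategory expandCategory expandCategory_alt
  rw [pvCoreEq]
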